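-- pv_equiv track=rewrite | github.com/zeldox258/Leetcode-Solutions | 3578/3578.py | count_partitions_with_maxmin_difference_
-- ===== SOURCE A (Python) =====
-- from typing import List
--
-- def count_partitions_with_maxmin_difference_(nums: List[int], k: int) -> int:
--     d = {0: 1}
--     s = count = 0
--     for x in nums:
--         s += x
--         count += d.get(s - k, 0)
--         d[s] = d.get(s, 0) + 1
--     return count
-- ===== SOURCE B (Python) =====
-- from typing import List
--
-- def count_partitions_with_maxmin_difference_(nums: List[int], k: int) -> int:
--     count = 0
--     suffix = nums
--     while suffix:
--         s = 0
--         for x in suffix: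
--             s += x
--             if s == k:
--                 count += 1
--         suffix = suffix[1:]
--     return count
-- ===== Notes on version B (the rewrite author's own statement) =====
-- stated objective: simpler
-- what changed: Replaces the prefix-sum hashmap with a plain nested scan: for each suffix start, a running sum over the suffix counts the subarrays summing to k; no dictionary is maintained.
import Mathlib
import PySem

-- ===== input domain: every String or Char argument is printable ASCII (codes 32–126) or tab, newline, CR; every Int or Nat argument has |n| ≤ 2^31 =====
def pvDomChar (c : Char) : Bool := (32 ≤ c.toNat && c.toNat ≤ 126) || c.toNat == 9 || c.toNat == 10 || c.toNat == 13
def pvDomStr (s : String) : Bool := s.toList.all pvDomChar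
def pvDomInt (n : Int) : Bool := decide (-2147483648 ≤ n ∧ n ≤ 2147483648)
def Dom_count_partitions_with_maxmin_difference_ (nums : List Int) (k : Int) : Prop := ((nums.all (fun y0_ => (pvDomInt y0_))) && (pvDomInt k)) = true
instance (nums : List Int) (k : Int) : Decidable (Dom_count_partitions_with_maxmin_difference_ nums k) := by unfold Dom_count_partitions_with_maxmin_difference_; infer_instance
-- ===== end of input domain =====

-- B replaces A's one-pass prefix-sum hashmap with a plain nested scan over suffixes
-- (no dictionary); objective: simpler, at the cost of O(n^2) vs O(n).

-- ===== PORT A =====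
-- one iteration of A's loop body: s += x; count += d.get(s-k, 0); d[s] = d.get(s,0)+1
def pvStepA (k : Int) (st : PySem.Dict Int Int × Int × Int) (x : Int) :
    PySem.Dict Int Int × Int × Int :=
  let s := st.2.1 + x
  let c := st.2.2 + st.1.getD (s - k) 0
  (st.1.insert s (st.1.getD s 0 + 1), s, c)

def count_partitions_with_maxmin_difference_ (nums : List Int) (k : Int) : Int :=
  (nums.foldl (pvStepA k) (PySem.Dict.empty.insert 0 1, 0, 0)).2.2

-- ===== PORT B =====
-- inner for-loop of B: running sum over xs, counting prefixes that sum to k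
def pvPrefCount (k : Int) (xs : List Int) : Int :=
  (xs.foldl (fun (st : Int × Int) x =>
      let s := st.1 + x
      (s, if s = k then st.2 + 1 else st.2)) (0, 0)).2

-- outer while-loop of B: peel the suffix one element at a time
def pvAltLoop (k : Int) : List Int → Int → Int
  | [], c => c
  | x :: rest, c => pvAltLoop k rest (c + pvPrefCount k (x :: rest))

def count_partitions_with_maxmin_difference__alt (nums : List Int) (k : Int) : Int :=
  pvAltLoop k nums 0

-- ===== PRECONDITION & SPEC =====
def Spec_count_partitions_with_maxmin_difference_ (nums : List Int) (k : Int) (out : Int) : Prop := out = count_partitions_with_maxmin_difference__alt nums k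
instance (nums : List Int) (k : Int) (out : Int) : Decidable (Spec_count_partitions_with_maxmin_difference_ nums k out) := by unfold Spec_count_partitions_with_maxmin_difference_; infer_instance

-- ===== CLAIM (what is proved, stated in full; the proofs are below) =====
def Claim_equal_count_partitions_with_maxmin_difference_ : Prop := ∀ (nums : List Int) (k : Int), Dom_count_partitions_with_maxmin_difference_ nums k → Spec_count_partitions_with_maxmin_difference_ nums k (count_partitions_with_maxmin_difference_ nums k)

-- ===== LEMMAS AND PROOFS =====

-- indicator: the subarray of q from index m through j (prefix-sum form) sums to k
def pvChi (q : List Int) (k : Int) (m j : Nat) : Int :=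
  if (q.take (j+1)).sum - (q.take m).sum = k then 1 else 0

-- running total of A, in spec form: contributions of the elements of r, processed after p
def pvE (k : Int) : List Int → List Int → Int
  | _, [] => 0
  | p, x :: r =>
    (∑ m ∈ Finset.range (p.length + 1), if (p.take m).sum = p.sum + x - k then (1:Int) else 0)
      + pvE k (p ++ [x]) r

-- sum over the triangle, grouped by end index
def pvG (q : List Int) (k : Int) (t : Nat) : Int :=
  ∑ j ∈ Finset.Ico t q.length, ∑ m ∈ Finset.range (j+1), pvChi q k m j

lemma pvA_loop (k : Int) (r : List Int) : ∀ (p : List Int) (d : PySem.Dict Int Int) (c : Int),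
    (∀ v : Int, d.getD v 0 = ∑ m ∈ Finset.range (p.length + 1),
        if (p.take m).sum = v then (1:Int) else 0) →
    (r.foldl (pvStepA k) (d, p.sum, c)).2.2 = c + pvE k p r := by
  induction r with
  | nil => intro p d c _; simp [pvE]
  | cons x r ih =>
    intro p d c hd
    have hstep : pvStepA k (d, p.sum, c) x
        = (d.insert (p.sum + x) (d.getD (p.sum + x) 0 + 1), p.sum + x,
           c + d.getD (p.sum + x - k) 0) := rfl
    have hsum : (p ++ [x]).sum = p.sum + x := by simp
    have hd' : ∀ v : Int,
        (d.insert (p.sum + x) (d.getD (p.sum + x) 0 + 1)).getD v 0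
        = ∑ m ∈ Finset.range ((p ++ [x]).length + 1),
            if ((p ++ [x]).take m).sum = v then (1:Int) else 0 := by
      intro v
      have hlen : (p ++ [x]).length = p.length + 1 := by simp
      rw [hlen, Finset.sum_range_succ]
      have htail : ((p ++ [x]).take (p.length + 1)).sum = p.sum + x := by
        rw [List.take_of_length_le (by simp)]; simp
      have hinit : ∀ m ∈ Finset.range (p.length + 1),
          (if ((p ++ [x]).take m).sum = v then (1:Int) else 0)
          = (if (p.take m).sum = v then (1:Int) else 0) := by
        intro m hm
        have hm' : m ≤ p.length := by
          have := Finset.mem_range.mp hm; omega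
        rw [List.take_append_of_le_length hm']
      rw [Finset.sum_congr rfl hinit, htail, PySem.Dict.getD_insert]
      by_cases hv : v = p.sum + x
      · subst hv; simp [hd]
      · have : ¬ (p.sum + x = v) := fun h => hv h.symm
        simp [hv, this, hd]
    have h2 := ih (p ++ [x]) _ (c + d.getD (p.sum + x - k) 0) hd'
    rw [hsum] at h2
    rw [List.foldl_cons, hstep, h2, pvE, hd (p.sum + x - k)]
    ring

lemma pvE_eq_G (k : Int) (r : List Int) : ∀ p : List Int,
    pvE k p r = pvG (p ++ r) k p.length := by
  induction r with
  | nil => intro p; simp [pvE, pvG]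
  | cons x r ih =>
    intro p
    have hq : p ++ x :: r = (p ++ [x]) ++ r := by simp
    have hlt : p.length < (p ++ x :: r).length := by simp
    have hhead : ∑ m ∈ Finset.range (p.length + 1),
        (if (p.take m).sum = p.sum + x - k then (1:Int) else 0)
        = ∑ m ∈ Finset.range (p.length + 1), pvChi (p ++ x :: r) k m p.length := by
      refine Finset.sum_congr rfl ?_
      intro m hm
      have hm' : m ≤ p.length := by have := Finset.mem_range.mp hm; omega
      unfold pvChi
      rw [List.take_append_of_le_length hm',
          show p.length + 1 = p.length + 1 from rfl]
      have htake : ((p ++ x :: r).take (p.length + 1)).sum = p.sum + x := by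
        have : (p ++ x :: r).take (p.length + 1) = p ++ [x] := by
          rw [show p.length + 1 = p.length + 1 from rfl]
          rw [List.take_append]
          simp
        rw [this]; simp
      rw [htake]
      exact if_congr (by omega) rfl rfl
    have hstep : pvG (p ++ x :: r) k p.length
        = (∑ m ∈ Finset.range (p.length + 1), pvChi (p ++ x :: r) k m p.length)
          + pvG (p ++ x :: r) k (p.length + 1) := by
      unfold pvG
      rw [Finset.sum_eq_sum_Ico_succ_bot hlt]
    rw [pvE, hstep, ← hhead]
    congr 1
    have := ih (p ++ [x])
    rw [← hq] at this
    simpa using this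

-- triangle swap: sum by end index = sum by start index
lemma pvTriangle (n : Nat) (f : Nat → Nat → Int) :
    ∑ j ∈ Finset.range n, ∑ m ∈ Finset.range (j+1), f m j
    = ∑ m ∈ Finset.range n, ∑ j ∈ Finset.Ico m n, f m j := by
  have h1 : ∀ j ∈ Finset.range n,
      ∑ m ∈ Finset.range (j+1), f m j
      = ∑ m ∈ Finset.range n, if m ≤ j then f m j else 0 := by
    intro j hj
    have hsub : Finset.range (j+1) ⊆ Finset.range n := by
      intro m hm
      have hm' := Finset.mem_range.mp hm
      have hj' := Finset.mem_range.mp hj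
      exact Finset.mem_range.mpr (by omega)
    calc ∑ m ∈ Finset.range (j+1), f m j
        = ∑ m ∈ Finset.range (j+1), (if m ≤ j then f m j else 0) :=
          Finset.sum_congr rfl (fun m hm => by
            rw [if_pos (by have := Finset.mem_range.mp hm; omega)])
      _ = ∑ m ∈ Finset.range n, (if m ≤ j then f m j else 0) :=
          Finset.sum_subset hsub (fun m _ hm => by
            rw [if_neg (by
              have : ¬ m < j + 1 := fun h => hm (Finset.mem_range.mpr h)
              omega)])
  have h2 : ∀ m ∈ Finset.range n,
      ∑ j ∈ Finset.Ico m n, f m j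
      = ∑ j ∈ Finset.range n, if m ≤ j then f m j else 0 := by
    intro m _
    have hsub : Finset.Ico m n ⊆ Finset.range n := by
      intro j hj
      exact Finset.mem_range.mpr (Finset.mem_Ico.mp hj).2
    calc ∑ j ∈ Finset.Ico m n, f m j
        = ∑ j ∈ Finset.Ico m n, (if m ≤ j then f m j else 0) :=
          Finset.sum_congr rfl (fun j hj => by
            rw [if_pos (Finset.mem_Ico.mp hj).1])
      _ = ∑ j ∈ Finset.range n, (if m ≤ j then f m j else 0) :=
          Finset.sum_subset hsub (fun j hj hj' => by
            rw [if_neg (by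
              have hjn := Finset.mem_range.mp hj
              have : ¬ (m ≤ j ∧ j < n) := fun h => hj' (Finset.mem_Ico.mpr h)
              omega)])
  rw [Finset.sum_congr rfl h1, Finset.sum_congr rfl h2, Finset.sum_comm]

lemma pvPrefCount_foldl (k : Int) (xs : List Int) : ∀ (s0 c0 : Int),
    xs.foldl (fun (st : Int × Int) x =>
      let s := st.1 + x
      (s, if s = k then st.2 + 1 else st.2)) (s0, c0)
    = (s0 + xs.sum,
       c0 + ∑ l ∈ Finset.range xs.length,
              if s0 + (xs.take (l+1)).sum = k then (1:Int) else 0) := by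
  induction xs with
  | nil => intro s0 c0; simp
  | cons x xs ih =>
    intro s0 c0
    rw [List.foldl_cons]
    show xs.foldl _ (s0 + x, if s0 + x = k then c0 + 1 else c0) = _
    rw [ih]
    simp only [Prod.mk.injEq]
    constructor
    · simp [add_assoc]
    · have : ∑ l ∈ Finset.range ((x :: xs).length),
          (if s0 + ((x :: xs).take (l+1)).sum = k then (1:Int) else 0)
          = (∑ l ∈ Finset.range xs.length,
              if s0 + x + (xs.take (l+1)).sum = k then (1:Int) else 0)
            + (if s0 + x = k then 1 else 0) := by
        rw [List.length_cons, Finset.sum_range_succ']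
        congr 1
        · refine Finset.sum_congr rfl ?_
          intro l _
          have : (x :: xs).take (l + 1 + 1) = x :: xs.take (l+1) := rfl
          rw [this]; simp [add_assoc]
        · simp
      rw [this]
      split_ifs <;> ring

lemma pvPrefCount_eq (k : Int) (xs : List Int) :
    pvPrefCount k xs
    = ∑ l ∈ Finset.range xs.length, if (xs.take (l+1)).sum = k then (1:Int) else 0 := by
  unfold pvPrefCount
  rw [pvPrefCount_foldl]
  simp

lemma pvAltLoop_eq (k : Int) (xs : List Int) : ∀ c : Int,
    pvAltLoop k xs c = c + ∑ i ∈ Finset.range xs.length, pvPrefCount k (xs.drop i) := by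
  induction xs with
  | nil => intro c; simp [pvAltLoop]
  | cons x xs ih =>
    intro c
    rw [pvAltLoop, ih]
    rw [List.length_cons, Finset.sum_range_succ']
    simp only [List.drop_succ_cons, List.drop_zero]
    ring

lemma pvSeg (q : List Int) (m j : Nat) (hmj : m ≤ j) :
    (q.take (j+1)).sum - (q.take m).sum = ((q.drop m).take (j+1-m)).sum := by
  have h : q.take (j+1) = q.take m ++ (q.drop m).take (j+1-m) := by
    have hm : m + (j+1-m) = j+1 := by omega
    rw [← hm, List.take_add]
    congr 2
    omega
  rw [h, List.sum_append]
  ring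

lemma pvAlt_eq_G (nums : List Int) (k : Int) :
    count_partitions_with_maxmin_difference__alt nums k = pvG nums k 0 := by
  unfold count_partitions_with_maxmin_difference__alt
  rw [pvAltLoop_eq, zero_add]
  unfold pvG
  rw [show Finset.Ico 0 nums.length = Finset.range nums.length from by
    rw [Finset.range_eq_Ico]]
  rw [pvTriangle nums.length (pvChi nums k)]
  refine Finset.sum_congr rfl ?_
  intro m hm
  have hmn : m < nums.length := Finset.mem_range.mp hm
  rw [pvPrefCount_eq, Finset.sum_Ico_eq_sum_range]
  have hlen : (nums.drop m).length = nums.length - m := by simp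
  rw [hlen]
  refine Finset.sum_congr rfl ?_
  intro l hl
  have hln : l < nums.length - m := Finset.mem_range.mp hl
  unfold pvChi
  rw [pvSeg nums m (m + l) (by omega)]
  have : m + l + 1 - m = l + 1 := by omega
  rw [this]

lemma pvA_eq_E (nums : List Int) (k : Int) :
    count_partitions_with_maxmin_difference_ nums k = pvE k [] nums := by
  unfold count_partitions_with_maxmin_difference_
  have h0 : ∀ v : Int, (PySem.Dict.empty.insert (0:Int) (1:Int)).getD v 0
      = ∑ m ∈ Finset.range (([]:List Int).length + 1),
          if (([]:List Int).take m).sum = v then (1:Int) else 0 := by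
    intro v
    rw [PySem.Dict.getD_insert]
    by_cases hv : v = 0
    · subst hv; simp
    · have : ¬ ((0:Int) = v) := fun h => hv h.symm
      simp [hv, this]
  have := pvA_loop k nums [] (PySem.Dict.empty.insert 0 1) 0 h0
  simpa using this

-- ===== VERDICT (by name: the statement is the Claim_ definition above) =====
theorem count_partitions_with_maxmin_difference__spec : Claim_equal_count_partitions_with_maxmin_difference_ := by
  intro nums k _
  unfold Spec_count_partitions_with_maxmin_difference_
  rw [pvA_eq_E, pvAlt_eq_G, pvE_eq_G]
  simp
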